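-- pv_equiv track=rewrite | github.com/vrijenattawar/zo-skills | booking-metadata-calendar/scripts/booking_metadata_calendar.py | _classify_meeting_intent
-- ===== SOURCE A (Python) =====
-- def _classify_meeting_intent(text: str) -> str:
--     if any(k in text for k in ("partnership", "collab", "pilot")):
--         return "partnership"
--     if any(k in text for k in ("customer", "prospect", "deal", "sales", "demo")):
--         return "sales"
--     if any(k in text for k in ("investor", "fundraise", "funding", "seed", "series a")):
--         return "investor"
--     if any(k in text for k in ("candidate", "hiring", "interview", "recruit")):
--         return "hiring"
--     if "intro" in text or "introduction" in text:
--         return "intro"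
--     if any(k in text for k in ("advisor", "advisory", "mentor")):
--         return "advisory"
--     if any(k in text for k in ("support", "help request")):
--         return "support"
--     if any(k in text for k in ("planning", "roadmap", "strategy", "alignment")):
--         return "internal-planning"
--     if any(k in text for k in ("check in", "catch up", "sync")):
--         return "check-in"
--     return "other"
-- ===== SOURCE B (Python) =====
-- # Flat keyword -> priority map; collect ALL hits in one comprehension and pick
-- # the minimum-priority label, instead of a short-circuiting if-cascade.
-- KEYWORD_PRIORITY = [
--     ("partnership", 0), ("collab", 0), ("pilot", 0),
--     ("customer", 1), ("prospect", 1), ("deal", 1), ("sales", 1), ("demo", 1),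
--     ("investor", 2), ("fundraise", 2), ("funding", 2), ("seed", 2), ("series a", 2),
--     ("candidate", 3), ("hiring", 3), ("interview", 3), ("recruit", 3),
--     ("intro", 4), ("introduction", 4),
--     ("advisor", 5), ("advisory", 5), ("mentor", 5),
--     ("support", 6), ("help request", 6),
--     ("planning", 7), ("roadmap", 7), ("strategy", 7), ("alignment", 7),
--     ("check in", 8), ("catch up", 8), ("sync", 8),
-- ]
--
-- LABELS = ["partnership", "sales", "investor", "hiring", "intro",
--           "advisory", "support", "internal-planning", "check-in"]
--
-- def _classify_meeting_intent(text: str) -> str: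
--     hits = [p for kw, p in KEYWORD_PRIORITY if kw in text]
--     return LABELS[min(hits)] if hits else "other"
-- ===== Notes on version B (the rewrite author's own statement) =====
-- stated objective: alternative
-- what changed: Replaced the short-circuiting nine-branch if-cascade with a flat keyword-to-priority map scanned once to collect every matching keyword's priority, returning the label of the minimum priority (no early returns, no per-group control flow).
import Mathlib
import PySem

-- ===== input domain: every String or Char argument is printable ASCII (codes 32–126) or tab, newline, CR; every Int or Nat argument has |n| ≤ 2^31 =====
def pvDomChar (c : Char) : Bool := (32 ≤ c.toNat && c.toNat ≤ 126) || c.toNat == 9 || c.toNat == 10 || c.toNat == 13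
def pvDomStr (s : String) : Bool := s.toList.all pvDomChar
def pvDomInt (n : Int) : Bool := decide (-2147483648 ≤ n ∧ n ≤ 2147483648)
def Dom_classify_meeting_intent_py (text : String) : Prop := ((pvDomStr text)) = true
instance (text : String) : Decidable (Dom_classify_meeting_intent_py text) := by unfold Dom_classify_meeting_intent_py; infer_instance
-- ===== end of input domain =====

-- B replaces A's short-circuiting nine-branch if-cascade by a flat keyword→priority map
-- scanned once to collect every matching keyword's priority, returning the label of the
-- minimum priority (alternative decomposition; same cost).

-- ===== PORT A =====
def classify_meeting_intent_py (text : String) : String :=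
  if ["partnership", "collab", "pilot"].any (fun k => PySem.Str.isIn k text) then "partnership"
  else if ["customer", "prospect", "deal", "sales", "demo"].any (fun k => PySem.Str.isIn k text) then "sales"
  else if ["investor", "fundraise", "funding", "seed", "series a"].any (fun k => PySem.Str.isIn k text) then "investor"
  else if ["candidate", "hiring", "interview", "recruit"].any (fun k => PySem.Str.isIn k text) then "hiring"
  else if PySem.Str.isIn "intro" text || PySem.Str.isIn "introduction" text then "intro"
  else if ["advisor", "advisory", "mentor"].any (fun k => PySem.Str.isIn k text) then "advisory"
  else if ["support", "help request"].any (fun k => PySem.Str.isIn k text) then "support"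
  else if ["planning", "roadmap", "strategy", "alignment"].any (fun k => PySem.Str.isIn k text) then "internal-planning"
  else if ["check in", "catch up", "sync"].any (fun k => PySem.Str.isIn k text) then "check-in"
  else "other"

-- ===== PORT B =====
def pvKeywordPriority : List (String × Int) :=
  [("partnership", 0), ("collab", 0), ("pilot", 0),
   ("customer", 1), ("prospect", 1), ("deal", 1), ("sales", 1), ("demo", 1),
   ("investor", 2), ("fundraise", 2), ("funding", 2), ("seed", 2), ("series a", 2),
   ("candidate", 3), ("hiring", 3), ("interview", 3), ("recruit", 3),
   ("intro", 4), ("introduction", 4),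
   ("advisor", 5), ("advisory", 5), ("mentor", 5),
   ("support", 6), ("help request", 6),
   ("planning", 7), ("roadmap", 7), ("strategy", 7), ("alignment", 7),
   ("check in", 8), ("catch up", 8), ("sync", 8)]

def pvLabels : List String :=
  ["partnership", "sales", "investor", "hiring", "intro",
   "advisory", "support", "internal-planning", "check-in"]

def pvHits (text : String) : List Int :=
  (pvKeywordPriority.filter (fun kp => PySem.Str.isIn kp.1 text)).map Prod.snd

def classify_meeting_intent_py_alt (text : String) : String :=
  let hits := pvHits text
  match PySem.List.min? hits (fun x => x) with
  | none => "other"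
  | some m => (PySem.List.pyGet? pvLabels m).getD ""  -- IndexError unreachable: m is a priority in 0..8

-- ===== PRECONDITION & SPEC =====
def Spec_classify_meeting_intent_py (text : String) (out : String) : Prop := out = classify_meeting_intent_py_alt text
instance (text : String) (out : String) : Decidable (Spec_classify_meeting_intent_py text out) := by unfold Spec_classify_meeting_intent_py; infer_instance

-- ===== CLAIM =====
def Claim_equal_classify_meeting_intent_py : Prop := ∀ (text : String), Dom_classify_meeting_intent_py text → Spec_classify_meeting_intent_py text (classify_meeting_intent_py text)

-- ===== LEMMAS AND PROOFS =====
lemma pv_min_eq (text : String) (k : Int) (hk : k ∈ pvHits text)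
    (hge : ∀ y ∈ pvHits text, k ≤ y) :
    PySem.List.min? (pvHits text) (fun x => x) = some k := by
  cases h : PySem.List.min? (pvHits text) (fun x => x) with
  | none => rw [PySem.List.min?_eq_none_iff] at h; simp [h] at hk
  | some m =>
    have hm := PySem.List.min?_mem h
    have h1 := PySem.List.min?_isMin h k hk
    have h2 := hge m hm
    simp only [Option.some.injEq]
    omega

lemma pv_alt_eq_of_min (text : String) (k : Int) (hk : k ∈ pvHits text)
    (hge : ∀ y ∈ pvHits text, k ≤ y) :
    classify_meeting_intent_py_alt text = (PySem.List.pyGet? pvLabels k).getD "" := by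
  simp only [classify_meeting_intent_py_alt, pv_min_eq text k hk hge]

lemma pv_hge_of (text : String) (k : Int)
    (hneg : ∀ kw p, (kw, p) ∈ pvKeywordPriority → p < k → PySem.Str.isIn kw text = false) :
    ∀ y ∈ pvHits text, k ≤ y := by
  intro y hy
  have : ∃ kp ∈ pvKeywordPriority, PySem.Str.isIn kp.1 text = true ∧ kp.2 = y := by
    simpa [pvHits, List.mem_map, List.mem_filter] using hy
  obtain ⟨⟨kw, p⟩, hmem, hin, rfl⟩ := this
  by_contra hlt
  rw [hneg kw p hmem (by omega)] at hin
  exact Bool.false_ne_true hin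

-- ===== VERDICT =====
set_option maxHeartbeats 4000000 in
theorem classify_meeting_intent_py_spec : Claim_equal_classify_meeting_intent_py := by
  intro text _
  unfold Spec_classify_meeting_intent_py classify_meeting_intent_py
  split_ifs with h0 h1 h2 h3 h4 h5 h6 h7 h8
  · have hk : (0:Int) ∈ pvHits text := by
      simp [pvHits, pvKeywordPriority, List.mem_filter]; simpa using h0
    have hge := pv_hge_of text 0 (by intro kw p hmem hp; fin_cases hmem <;> simp_all)
    rw [pv_alt_eq_of_min text 0 hk hge]; decide
  · have hk : (1:Int) ∈ pvHits text := by
      simp [pvHits, pvKeywordPriority, List.mem_filter]; simpa using h1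
    have hge := pv_hge_of text 1 (by intro kw p hmem hp; fin_cases hmem <;> simp_all)
    rw [pv_alt_eq_of_min text 1 hk hge]; decide
  · have hk : (2:Int) ∈ pvHits text := by
      simp [pvHits, pvKeywordPriority, List.mem_filter]; simpa using h2
    have hge := pv_hge_of text 2 (by intro kw p hmem hp; fin_cases hmem <;> simp_all)
    rw [pv_alt_eq_of_min text 2 hk hge]; decide
  · have hk : (3:Int) ∈ pvHits text := by
      simp [pvHits, pvKeywordPriority, List.mem_filter]; simpa using h3
    have hge := pv_hge_of text 3 (by intro kw p hmem hp; fin_cases hmem <;> simp_all)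
    rw [pv_alt_eq_of_min text 3 hk hge]; decide
  · have hk : (4:Int) ∈ pvHits text := by
      simp [pvHits, pvKeywordPriority, List.mem_filter]; simpa using h4
    have hge := pv_hge_of text 4 (by intro kw p hmem hp; fin_cases hmem <;> simp_all)
    rw [pv_alt_eq_of_min text 4 hk hge]; decide
  · have hk : (5:Int) ∈ pvHits text := by
      simp [pvHits, pvKeywordPriority, List.mem_filter]; simpa using h5
    have hge := pv_hge_of text 5 (by intro kw p hmem hp; fin_cases hmem <;> simp_all)
    rw [pv_alt_eq_of_min text 5 hk hge]; decide
  · have hk : (6:Int) ∈ pvHits text := by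
      simp [pvHits, pvKeywordPriority, List.mem_filter]; simpa using h6
    have hge := pv_hge_of text 6 (by intro kw p hmem hp; fin_cases hmem <;> simp_all)
    rw [pv_alt_eq_of_min text 6 hk hge]; decide
  · have hk : (7:Int) ∈ pvHits text := by
      simp [pvHits, pvKeywordPriority, List.mem_filter]; simpa using h7
    have hge := pv_hge_of text 7 (by intro kw p hmem hp; fin_cases hmem <;> simp_all)
    rw [pv_alt_eq_of_min text 7 hk hge]; decide
  · have hk : (8:Int) ∈ pvHits text := by
      simp [pvHits, pvKeywordPriority, List.mem_filter]; simpa using h8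
    have hge := pv_hge_of text 8 (by intro kw p hmem hp; fin_cases hmem <;> simp_all)
    rw [pv_alt_eq_of_min text 8 hk hge]; decide
  · have hnil : pvHits text = [] := by
      simp only [pvHits, List.map_eq_nil_iff, List.filter_eq_nil_iff]
      intro kp hmem
      fin_cases hmem <;> simp_all
    simp [classify_meeting_intent_py_alt, hnil, PySem.List.min?]
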